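-- pv_equiv track=rewrite | github.com/Merubokkusu/Discord-S.C.U.M | discum/gateway/guildcommands.py | rangeCalc
-- ===== SOURCE A (Python) =====
-- def rangeCalc(memberCount):
-- 	ranges = []
-- 	for i in range(int(memberCount/100)+1):
-- 		rangechunk = [[100*j, 100*j+99] for j in range(i+1)]
-- 		if len(rangechunk)>3:
-- 			del rangechunk[1:-2]
-- 		ranges.append(rangechunk)
-- 	return ranges
-- ===== SOURCE B (Python) =====
-- def rangeCalc(memberCount):
--     n = int(memberCount / 100) + 1
--     head = [[[100 * j, 100 * j + 99] for j in range(i + 1)] for i in range(min(n, 3))]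
--     tail = [[[0, 99], [100 * (i - 1), 100 * i - 1], [100 * i, 100 * i + 99]] for i in range(3, n)]
--     return head + tail
-- ===== Notes on version B (the rewrite author's own statement) =====
-- stated objective: faster
-- what changed: Instead of rebuilding each row's full chunk and deleting its middle with del[1:-2], B computes each row directly in closed form: the first min(n,3) rows as growing comprehensions and every later row as the literal triple [[0,99],[100*(i-1),100*i-1],[100*i,100*i+99]], concatenating the two blocks.
import Mathlib
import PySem

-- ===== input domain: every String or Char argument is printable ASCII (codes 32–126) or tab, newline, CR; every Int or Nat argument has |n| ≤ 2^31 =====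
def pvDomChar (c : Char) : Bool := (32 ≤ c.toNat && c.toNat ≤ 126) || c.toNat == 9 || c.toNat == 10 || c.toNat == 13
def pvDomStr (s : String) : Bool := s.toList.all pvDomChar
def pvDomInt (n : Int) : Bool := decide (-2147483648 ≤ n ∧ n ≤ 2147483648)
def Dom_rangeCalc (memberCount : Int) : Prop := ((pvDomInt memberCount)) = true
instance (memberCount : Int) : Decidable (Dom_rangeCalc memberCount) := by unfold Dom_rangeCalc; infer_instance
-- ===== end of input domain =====

-- B builds each row in closed form (first ≤3 rows as comprehensions, later rows as a literal triple)
-- instead of A's rebuild-then-del[1:-2]; objective: alternative decomposition.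

-- ===== PORT A =====
-- int(memberCount/100) is PySem.Int.truncdiv (exact for |memberCount| ≤ 2^31 < 2^53);
-- del rangechunk[1:-2] keeps index 0 and the last two elements: since it only runs when
-- len > 3, it is exactly take 1 ++ drop (len - 2).
def rangeCalc (memberCount : Int) : List (List (List Int)) :=
  (PySem.List.pyRange 0 (PySem.Int.truncdiv memberCount 100 + 1) 1).foldl
    (fun ranges i =>
      let rangechunk := (PySem.List.pyRange 0 (i + 1) 1).map (fun j => [100 * j, 100 * j + 99])
      let rangechunk := if PySem.List.len rangechunk > 3
        then rangechunk.take 1 ++ rangechunk.drop (rangechunk.length - 2)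
        else rangechunk
      ranges ++ [rangechunk]) []

-- ===== PORT B =====
def rangeCalc_alt (memberCount : Int) : List (List (List Int)) :=
  let n := PySem.Int.truncdiv memberCount 100 + 1
  ((PySem.List.pyRange 0 (min n 3) 1).map (fun i =>
      (PySem.List.pyRange 0 (i + 1) 1).map (fun j => [100 * j, 100 * j + 99])))
    ++ ((PySem.List.pyRange 3 n 1).map (fun i =>
      [[0, 99], [100 * (i - 1), 100 * i - 1], [100 * i, 100 * i + 99]]))

-- ===== PRECONDITION & SPEC =====
def Spec_rangeCalc (memberCount : Int) (out : List (List (List Int))) : Prop := out = rangeCalc_alt memberCount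
instance (memberCount : Int) (out : List (List (List Int))) : Decidable (Spec_rangeCalc memberCount out) := by unfold Spec_rangeCalc; infer_instance

-- ===== CLAIM (what is proved, stated in full; the proofs are below) =====
def Claim_equal_rangeCalc : Prop := ∀ (memberCount : Int), Dom_rangeCalc memberCount → Spec_rangeCalc memberCount (rangeCalc memberCount)

-- ===== LEMMAS AND PROOFS =====

-- A's per-iteration row (the loop body, zeta-reduced)
def pvRowA (i : Int) : List (List Int) :=
  let rangechunk := (PySem.List.pyRange 0 (i + 1) 1).map (fun j => [100 * j, 100 * j + 99])
  if PySem.List.len rangechunk > 3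
    then rangechunk.take 1 ++ rangechunk.drop (rangechunk.length - 2)
    else rangechunk

lemma pvRangeCalc_eq_map (m : Int) :
    rangeCalc m = (PySem.List.pyRange 0 (PySem.Int.truncdiv m 100 + 1) 1).map pvRowA := by
  show (PySem.List.pyRange 0 (PySem.Int.truncdiv m 100 + 1) 1).foldl
        (fun ranges i => ranges ++ [pvRowA i]) [] = _
  simpa using PySem.List.foldl_append_singleton_eq_map
    (l := PySem.List.pyRange 0 (PySem.Int.truncdiv m 100 + 1) 1) (f := pvRowA) (acc := [])

-- untrimmed rows: for 0 ≤ i < 3 the chunk has ≤ 3 pairs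
lemma pvRowA_small (i : Int) (h0 : 0 ≤ i) (h3 : i < 3) :
    pvRowA i = (PySem.List.pyRange 0 (i + 1) 1).map (fun j => [100 * j, 100 * j + 99]) := by
  interval_cases i <;> decide

-- trimmed rows: for 3 ≤ i the row is the literal triple
lemma pvRowA_big (i : Int) (h : 3 ≤ i) :
    pvRowA i = [[0, 99], [100 * (i - 1), 100 * i - 1], [100 * i, 100 * i + 99]] := by
  obtain ⟨k, rfl⟩ : ∃ k : Nat, i = ((k : Int) + 3) := ⟨(i - 3).toNat, by omega⟩
  have h1 : (k : Int) + 3 + 1 = ((k + 4 : Nat) : Int) := by push_cast; ring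
  rw [pvRowA, h1, PySem.List.pyRange_zero_natCast, List.map_map]
  rw [if_pos (by simp [PySem.List.len_eq]; omega)]
  have hsplit : List.range (k + 4) = List.range (k + 2) ++ [k + 2, k + 3] := by
    simp [List.range_succ]
  rw [show ((List.range (k + 4)).map ((fun j : Int => [100 * j, 100 * j + 99]) ∘
        (fun k : Nat => (k : Int)))).length - 2 = k + 2 by simp]
  rw [← List.map_take, ← List.map_drop, List.take_range,
      show min 1 (k + 4) = 1 by omega,
      hsplit, List.drop_append_of_le_length (by simp)]
  simp [List.range_one]
  ring_nf
  simp

-- the whole-list identity underlying the claim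
lemma pvMain (n : Int) :
    (PySem.List.pyRange 0 n 1).map pvRowA =
      ((PySem.List.pyRange 0 (min n 3) 1).map (fun i =>
          (PySem.List.pyRange 0 (i + 1) 1).map (fun j => [100 * j, 100 * j + 99])))
        ++ ((PySem.List.pyRange 3 n 1).map (fun i =>
          [[0, 99], [100 * (i - 1), 100 * i - 1], [100 * i, 100 * i + 99]])) := by
  by_cases h3 : n ≤ 3
  · rw [show min n 3 = n by omega, PySem.List.pyRange_one_eq_nil h3, List.map_nil,
        List.append_nil]
    exact List.map_congr_left (fun i hi => by
      have := PySem.List.mem_pyRange_one.mp hi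
      exact pvRowA_small i this.1 (by omega))
  · rw [show min n 3 = 3 by omega,
        PySem.List.pyRange_one_append 0 3 n (by omega) (by omega), List.map_append]
    have h1 : (PySem.List.pyRange 0 3 1).map pvRowA =
        (PySem.List.pyRange 0 3 1).map (fun i =>
          (PySem.List.pyRange 0 (i + 1) 1).map (fun j => [100 * j, 100 * j + 99])) :=
      List.map_congr_left (fun i hi => by
        have := PySem.List.mem_pyRange_one.mp hi
        exact pvRowA_small i this.1 this.2)
    rw [h1]
    congr 1
    exact List.map_congr_left (fun i hi => by
      have := PySem.List.mem_pyRange_one.mp hi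
      exact pvRowA_big i this.1)

-- ===== VERDICT (by name: the statement is the Claim_ definition above) =====
theorem rangeCalc_spec : Claim_equal_rangeCalc := by
  intro m _
  show rangeCalc m = rangeCalc_alt m
  have halt : rangeCalc_alt m =
      ((PySem.List.pyRange 0 (min (PySem.Int.truncdiv m 100 + 1) 3) 1).map (fun i =>
          (PySem.List.pyRange 0 (i + 1) 1).map (fun j => [100 * j, 100 * j + 99])))
        ++ ((PySem.List.pyRange 3 (PySem.Int.truncdiv m 100 + 1) 1).map (fun i =>
          [[0, 99], [100 * (i - 1), 100 * i - 1], [100 * i, 100 * i + 99]])) := rfl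
  rw [pvRangeCalc_eq_map, halt]
  exact pvMain _
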